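-- pv_equiv track=rewrite | github.com/negreskul/wide_nets | hamming_code/lab1_server.py | return_to_null
-- ===== SOURCE A (Python) =====
-- import copy
--
-- def return_to_null(bitlist):
--     result = copy.deepcopy(bitlist)
--     i = 1
--     leng = len(bitlist)
--     while i <= leng:
--         result[i-1] = 0
--         i *= 2
--     return result
-- ===== SOURCE B (Python) =====
-- import copy
--
-- def return_to_null(bitlist):
--     return [0 if (p & (p - 1)) == 0 else copy.deepcopy(x)
--             for p, x in enumerate(bitlist, 1)]
-- ===== Notes on version B (the rewrite author's own statement) =====
-- stated objective: alternative
-- what changed: A deep-copies the list and then jumps through it by doubling an index (i = 1, 2, 4, ...) zeroing those slots; B is a single comprehension over enumerate(bitlist, 1) that zeroes an element exactly when its 1-based position p satisfies the power-of-two bit test (p & (p-1)) == 0, deep-copying the others.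
import Mathlib
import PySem

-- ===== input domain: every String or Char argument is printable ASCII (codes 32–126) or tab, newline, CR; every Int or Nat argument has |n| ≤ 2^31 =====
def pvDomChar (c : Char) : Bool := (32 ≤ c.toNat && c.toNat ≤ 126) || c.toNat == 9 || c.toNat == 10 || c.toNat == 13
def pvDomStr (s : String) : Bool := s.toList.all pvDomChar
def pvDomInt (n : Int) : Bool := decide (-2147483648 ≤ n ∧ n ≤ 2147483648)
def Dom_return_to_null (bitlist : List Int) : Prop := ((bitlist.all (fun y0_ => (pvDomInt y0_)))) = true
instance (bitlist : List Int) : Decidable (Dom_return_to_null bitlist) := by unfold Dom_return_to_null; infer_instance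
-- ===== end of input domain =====

-- B replaces A's index-doubling while-loop by one pass over the list zeroing
-- each 1-based position p with (p & (p-1)) == 0; alternative decomposition, not faster.

-- ===== PORT A =====
-- while i <= leng: result[i-1] = 0; i *= 2   (the '1 ≤ i' conjunct is only a
-- totality guard: the loop is always entered with i ≥ 1 and doubling keeps it)
def returnNullLoop (result : List Int) (i leng : Nat) : List Int :=
  if h : 1 ≤ i ∧ i ≤ leng then
    returnNullLoop (result.set (i - 1) 0) (i * 2) leng
  else result
termination_by leng + 1 - i
decreasing_by omega

def return_to_null (bitlist : List Int) : List Int :=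
  returnNullLoop bitlist 1 bitlist.length

-- ===== PORT B =====
def return_to_null_alt (bitlist : List Int) : List Int :=
  (bitlist.zipIdx 1).map (fun xp => if xp.2 &&& (xp.2 - 1) == 0 then 0 else xp.1)

-- ===== PRECONDITION & SPEC =====
def Spec_return_to_null (bitlist : List Int) (out : List Int) : Prop := out = return_to_null_alt bitlist
instance (bitlist : List Int) (out : List Int) : Decidable (Spec_return_to_null bitlist out) := by unfold Spec_return_to_null; infer_instance

-- ===== CLAIM (what is proved, stated in full; the proofs are below) =====
def Claim_equal_return_to_null : Prop := ∀ (bitlist : List Int), Dom_return_to_null bitlist → Spec_return_to_null bitlist (return_to_null bitlist)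

-- ===== LEMMAS AND PROOFS =====

theorem returnNullLoop_length (result : List Int) (i leng : Nat) :
    (returnNullLoop result i leng).length = result.length := by
  fun_induction returnNullLoop with
  | case1 r i' h ih => simpa using ih
  | case2 r i' h => rfl

-- positions the loop never touches keep their value
theorem returnNullLoop_miss (leng : Nat) : ∀ (n i : Nat) (result : List Int) (j : Nat),
    leng + 1 - i ≤ n →
    ((∀ k : Nat, j + 1 ≠ i * 2 ^ k) ∨ leng < j + 1) →
    (returnNullLoop result i leng)[j]? = result[j]? := by
  intro n
  induction n with
  | zero =>
    intro i r j hn hmiss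
    have hno : ¬ (1 ≤ i ∧ i ≤ leng) := by omega
    rw [returnNullLoop.eq_def, dif_neg hno]
  | succ n ih =>
    intro i r j hn hmiss
    by_cases h : 1 ≤ i ∧ i ≤ leng
    · have hne : i - 1 ≠ j := by
        rcases hmiss with hm | hm
        · have := hm 0; omega
        · omega
      have hmiss' : (∀ k : Nat, j + 1 ≠ i * 2 * 2 ^ k) ∨ leng < j + 1 := by
        rcases hmiss with hm | hm
        · left; intro k heq
          apply hm (k + 1)
          rw [heq, pow_succ]; ring
        · right; exact hm
      have step := ih (i * 2) (r.set (i - 1) 0) j (by omega) hmiss'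
      rw [returnNullLoop.eq_def, dif_pos h, step, List.getElem?_set_ne hne]
    · rw [returnNullLoop.eq_def, dif_neg h]

-- positions of the form i·2^k − 1 (within range) get zeroed
theorem returnNullLoop_hit (leng : Nat) : ∀ (n i : Nat) (result : List Int) (j : Nat),
    leng + 1 - i ≤ n → 1 ≤ i → leng ≤ result.length →
    (∃ k : Nat, j + 1 = i * 2 ^ k) → j + 1 ≤ leng →
    (returnNullLoop result i leng)[j]? = some 0 := by
  intro n
  induction n with
  | zero =>
    intro i r j hn hi hlen hhit hle
    exfalso
    obtain ⟨k, hk⟩ := hhit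
    have h1 : (1:ℕ) ≤ 2 ^ k := Nat.one_le_two_pow
    have : i ≤ i * 2 ^ k := Nat.le_mul_of_pos_right _ (by omega)
    omega
  | succ n ih =>
    intro i r j hn hi hlen hhit hle
    obtain ⟨k, hk⟩ := hhit
    have h1 : (1:ℕ) ≤ 2 ^ k := Nat.one_le_two_pow
    have hile : i ≤ i * 2 ^ k := Nat.le_mul_of_pos_right _ (by omega)
    have h : 1 ≤ i ∧ i ≤ leng := ⟨hi, by omega⟩
    rw [returnNullLoop.eq_def, dif_pos h]
    rcases Nat.eq_zero_or_pos k with rfl | hkpos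
    · -- j + 1 = i : this step zeroes it, later steps never touch it again
      simp only [pow_zero, Nat.mul_one] at hk
      have hmiss : (∀ m : Nat, j + 1 ≠ i * 2 * 2 ^ m) ∨ leng < j + 1 := by
        left; intro m
        have h1 : (1:ℕ) ≤ 2 ^ m := Nat.one_le_two_pow
        have h2 : i * 2 ≤ i * 2 * 2 ^ m := Nat.le_mul_of_pos_right _ (by omega)
        omega
      have step := returnNullLoop_miss leng n (i * 2) (r.set (i - 1) 0) j
        (by omega) hmiss
      have hj : i - 1 < r.length := by omega
      rw [step, show j = i - 1 by omega, List.getElem?_set_self hj]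
    · -- j + 1 = (2i)·2^(k-1)
      apply ih (i * 2) (r.set (i - 1) 0) j (by omega) (by omega) (by simpa using hlen)
      · refine ⟨k - 1, ?_⟩
        rcases Nat.exists_eq_succ_of_ne_zero (by omega : k ≠ 0) with ⟨m, rfl⟩
        simp only [Nat.succ_sub_one]
        rw [hk, pow_succ]; ring
      · exact hle

-- the bit trick: for p ≥ 1, p &&& (p−1) = 0 ↔ p is a power of two
theorem land_pred_eq_zero_iff : ∀ p : Nat, 1 ≤ p →
    ((p &&& (p - 1) = 0) ↔ ∃ k : Nat, p = 2 ^ k) := by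
  intro p
  induction p using Nat.strong_induction_on with
  | _ p ih =>
    intro hp
    rcases Nat.lt_or_ge p 2 with h2 | h2
    · interval_cases p
      simp only [show (1:ℕ) &&& 0 = 0 from rfl, true_iff]
      exact ⟨0, by norm_num⟩
    rcases Nat.even_or_odd p with ⟨q, hq⟩ | ⟨q, hq⟩
    · -- p = 2q, q ≥ 1 : p &&& (p−1) = 2·(q &&& (q−1))
      have hq1 : 1 ≤ q := by omega
      have e1 : p = Nat.bit false q := by rw [Nat.bit_false_apply]; omega
      have e2 : p - 1 = Nat.bit true (q - 1) := by rw [Nat.bit_true_apply]; omega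
      have key : p &&& (p - 1) = 2 * (q &&& (q - 1)) := by
        rw [e2, e1, Nat.land_bit, Bool.false_and, Nat.bit_false_apply]
      have ihq := ih q (by omega) hq1
      rw [key]
      constructor
      · intro h0
        obtain ⟨k, hk⟩ := ihq.mp (by omega)
        exact ⟨k + 1, by rw [pow_succ]; omega⟩
      · rintro ⟨k, hk⟩
        rcases Nat.eq_zero_or_pos k with rfl | hkpos
        · omega
        have hq2 : q = 2 ^ (k - 1) := by
          rcases Nat.exists_eq_succ_of_ne_zero (by omega : k ≠ 0) with ⟨m, rfl⟩
          rw [pow_succ] at hk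
          simp only [Nat.succ_sub_one]
          omega
        have := ihq.mpr ⟨k - 1, hq2⟩
        omega
    · -- p = 2q+1 > 1 odd : p &&& (p−1) = 2·q ≠ 0 and p is no power of two
      have hq1 : 1 ≤ q := by omega
      have e1 : p = Nat.bit true q := by rw [Nat.bit_true_apply]; omega
      have e2 : p - 1 = Nat.bit false q := by rw [Nat.bit_false_apply]; omega
      have key : p &&& (p - 1) = 2 * q := by
        rw [e2, e1, Nat.land_bit, Bool.true_and]
        rw [show (false : Bool) = false from rfl, Nat.bit_false_apply, Nat.and_self]
      rw [key]
      constructor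
      · intro h0; omega
      · rintro ⟨k, hk⟩
        rcases Nat.eq_zero_or_pos k with rfl | hkpos
        · omega
        · exfalso
          have : 2 ∣ p := hk ▸ dvd_pow_self 2 (by omega)
          omega

theorem alt_length (bitlist : List Int) :
    (return_to_null_alt bitlist).length = bitlist.length := by
  simp [return_to_null_alt]

theorem alt_getElem? (bitlist : List Int) (j : Nat) (hj : j < bitlist.length) :
    (return_to_null_alt bitlist)[j]?
      = some (if (j + 1) &&& j = 0 then 0 else bitlist[j]) := by
  have hj' : j < (return_to_null_alt bitlist).length := by rwa [alt_length]
  rw [List.getElem?_eq_getElem hj']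
  congr 1
  simp [return_to_null_alt, List.getElem_zipIdx, Nat.add_comm 1 j]

-- ===== VERDICT (by name: the statement is the Claim_ definition above) =====
theorem return_to_null_spec : Claim_equal_return_to_null := by
  intro bitlist _
  unfold Spec_return_to_null return_to_null
  apply List.ext_getElem?
  intro j
  by_cases hjlen : j < bitlist.length
  · rw [alt_getElem? bitlist j hjlen]
    by_cases hpow : (j + 1) &&& j = 0
    · rw [if_pos hpow]
      have hpw := (land_pred_eq_zero_iff (j + 1) (by omega)).mp (by simpa using hpow)
      exact returnNullLoop_hit bitlist.length (bitlist.length + 1) 1 bitlist j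
        (by omega) (by omega) le_rfl
        ⟨hpw.choose, by rw [Nat.one_mul]; exact hpw.choose_spec⟩ (by omega)
    · rw [if_neg hpow]
      rw [returnNullLoop_miss bitlist.length (bitlist.length + 1) 1 bitlist j (by omega)
        (Or.inl (fun k hk => hpow
          (by simpa using (land_pred_eq_zero_iff (j + 1) (by omega)).mpr ⟨k, by omega⟩)))]
      rw [List.getElem?_eq_getElem hjlen]
  · rw [List.getElem?_eq_none (by rw [returnNullLoop_length]; omega),
        List.getElem?_eq_none (by rw [alt_length]; omega)]
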